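-- pv_equiv track=rewrite | github.com/PyEchartContribsBot/Py-EchartContribsBot | chart_styles/namespace_stacked_style.py | _build_namespace_colors
-- ===== SOURCE A (Python) =====
-- def _namespace_hue(ns_id: int) -> int:
--     return int((ns_id * 2654435761) % 360)
--
-- def _pick_lightness(variant_index: int) -> int:
--     cycle = [48, 58, 40, 66]
--     return cycle[variant_index % len(cycle)]
--
-- def _build_namespace_colors(
--         namespace_ids: list[int]) -> dict[int, dict[str, str]]:
--     hue_variant_counts: dict[int, int] = {}
--     color_map: dict[int, dict[str, str]] = {}
--
--     for ns_id in namespace_ids: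
--         hue = _namespace_hue(ns_id)
--         variant_index = hue_variant_counts.get(hue, 0)
--         hue_variant_counts[hue] = variant_index + 1
--
--         lightness = _pick_lightness(variant_index)
--         line_color = f"hsl({hue}, 62%, {lightness}%)"
--         area_color = f"hsla({hue}, 62%, {lightness}%, 0.35)"
--         color_map[ns_id] = {
--             "line": line_color,
--             "area": area_color,
--         }
--
--     return color_map
-- ===== SOURCE B (Python) =====
-- def _namespace_hue(ns_id: int) -> int:
--     return int((ns_id * 2654435761) % 360)
--
--
-- def _build_namespace_colors(
--         namespace_ids: list[int]) -> dict[int, dict[str, str]]: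
--     # First pass: group positions by hue, in occurrence order.
--     groups: dict[int, list[int]] = {}
--     for i, ns_id in enumerate(namespace_ids):
--         groups.setdefault(_namespace_hue(ns_id), []).append(i)
--
--     # Second pass: per hue group, the enumerate index is the variant index.
--     cycle = (48, 58, 40, 66)
--     entries = [None] * len(namespace_ids)
--     for hue, idxs in groups.items():
--         for k, i in enumerate(idxs):
--             lightness = cycle[k % 4]
--             entries[i] = {
--                 "line": f"hsl({hue}, 62%, {lightness}%)",
--                 "area": f"hsla({hue}, 62%, {lightness}%, 0.35)",
--             }
--
--     # dict() keeps the first position and last value for duplicate ids,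
--     # exactly like repeated assignment in a single scan.
--     return dict(zip(namespace_ids, entries))
-- ===== Notes on version B (the rewrite author's own statement) =====
-- stated objective: alternative
-- what changed: Replaces A's single scan with a running per-hue counter dict by a two-pass grouping: first group positions by hue, then per hue group the enumerate index is the variant index, writing entries into a position-indexed list and assembling the dict with dict(zip(...)).
import Mathlib
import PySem

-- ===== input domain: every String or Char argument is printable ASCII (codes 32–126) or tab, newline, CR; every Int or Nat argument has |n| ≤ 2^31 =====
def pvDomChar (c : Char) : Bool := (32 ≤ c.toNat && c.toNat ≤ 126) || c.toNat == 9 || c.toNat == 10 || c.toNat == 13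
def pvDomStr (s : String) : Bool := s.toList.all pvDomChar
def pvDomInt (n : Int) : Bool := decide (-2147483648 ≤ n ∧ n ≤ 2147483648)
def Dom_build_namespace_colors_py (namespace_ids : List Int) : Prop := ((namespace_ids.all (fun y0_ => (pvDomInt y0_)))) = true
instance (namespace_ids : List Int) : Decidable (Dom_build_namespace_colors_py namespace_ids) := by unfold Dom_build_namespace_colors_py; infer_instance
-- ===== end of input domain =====

-- B replaces A's single scan with a running per-hue counter by a two-pass grouping
-- (hue -> positions, then per-group enumeration gives the variant index); objective:
-- alternative decomposition, same cost.

-- ===== PORT A =====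
def pvHueA (ns_id : Int) : Int := PySem.Int.mod (ns_id * 2654435761) 360
-- cycle[variant_index % len(cycle)]; the index 'mod v 4' is always in [0,4), so pyGetD is exact here
def pvPickLightnessA (variant_index : Int) : Int :=
  let cycle : List Int := [48, 58, 40, 66]
  PySem.List.pyGetD cycle (PySem.Int.mod variant_index (cycle.length : Int)) 0
def pvColorEntryA (hue lightness : Int) : List (String × String) :=
  [("line", "hsl(" ++ PySem.Int.toStr hue ++ ", 62%, " ++ PySem.Int.toStr lightness ++ "%)"),
   ("area", "hsla(" ++ PySem.Int.toStr hue ++ ", 62%, " ++ PySem.Int.toStr lightness ++ "%, 0.35)")]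
-- loop body of A's single scan (the two dict updates)
def pvStepA (st : PySem.Dict Int Int × PySem.Dict Int (List (String × String))) (ns_id : Int) :
    PySem.Dict Int Int × PySem.Dict Int (List (String × String)) :=
  let hue := pvHueA ns_id
  let variant_index := st.1.getD hue 0
  let counts := st.1.insert hue (variant_index + 1)
  let lightness := pvPickLightnessA variant_index
  (counts, st.2.insert ns_id (pvColorEntryA hue lightness))
def build_namespace_colors_py (namespace_ids : List Int) : List (Int × List (String × String)) :=
  (namespace_ids.foldl pvStepA (PySem.Dict.empty, PySem.Dict.empty)).2.items
-- ===== PORT B =====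
def pvHueB (ns_id : Int) : Int := PySem.Int.mod (ns_id * 2654435761) 360
def pvCycleB : List Int := [48, 58, 40, 66]
def pvColorEntryB (hue lightness : Int) : List (String × String) :=
  [("line", "hsl(" ++ PySem.Int.toStr hue ++ ", 62%, " ++ PySem.Int.toStr lightness ++ "%)"),
   ("area", "hsla(" ++ PySem.Int.toStr hue ++ ", 62%, " ++ PySem.Int.toStr lightness ++ "%, 0.35)")]
-- groups.setdefault(hue, []).append(i)
def pvGroupStepB (g : PySem.Dict Int (List Int)) (p : Int × Int) : PySem.Dict Int (List Int) :=
  g.insert (pvHueB p.2) (g.getD (pvHueB p.2) [] ++ [p.1])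
-- inner loop: for k, i in enumerate(idxs): entries[i] = {...} (k%4 in [0,4), i in range: pyGetD/pySetD exact)
def pvPaintB (es : List (List (String × String))) (q : Int × List Int) : List (List (String × String)) :=
  (PySem.List.enumerate q.2).foldl
    (fun es r =>
      PySem.List.pySetD es r.2
        (pvColorEntryB q.1 (PySem.List.pyGetD pvCycleB (PySem.Int.mod r.1 4) 0)))
    es
-- dict(zip(...)) built pair by pair
def pvInsB (d : PySem.Dict Int (List (String × String))) (p : Int × List (String × String)) :
    PySem.Dict Int (List (String × String)) := d.insert p.1 p.2
def build_namespace_colors_py_alt (namespace_ids : List Int) : List (Int × List (String × String)) :=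
  let groups : PySem.Dict Int (List Int) :=
    (PySem.List.enumerate namespace_ids).foldl pvGroupStepB PySem.Dict.empty
  let entries : List (List (String × String)) :=
    groups.items.foldl pvPaintB (List.replicate namespace_ids.length [])
  ((namespace_ids.zip entries).foldl pvInsB PySem.Dict.empty).items

-- ===== PRECONDITION & SPEC =====
def Spec_build_namespace_colors_py (namespace_ids : List Int) (out : List (Int × List (String × String))) : Prop := out = build_namespace_colors_py_alt namespace_ids
instance (namespace_ids : List Int) (out : List (Int × List (String × String))) : Decidable (Spec_build_namespace_colors_py namespace_ids out) := by unfold Spec_build_namespace_colors_py; infer_instance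

-- ===== CLAIM (what is proved, stated in full; the proofs are below) =====
def Claim_equal_build_namespace_colors_py : Prop := ∀ (namespace_ids : List Int), Dom_build_namespace_colors_py namespace_ids → Spec_build_namespace_colors_py namespace_ids (build_namespace_colors_py namespace_ids)

-- ===== LEMMAS AND PROOFS =====

-- the (ns_id, entry) pair written for an element whose hue was seen v times before
def pvEntryOf (h v : Int) : List (String × String) := pvColorEntryA h (pvPickLightnessA v)
def pvSpecPairs : List Int → List Int → List (Int × List (String × String))
  | _, [] => []
  | seenH, x :: xs =>
      (x, pvEntryOf (pvHueA x) ((seenH.count (pvHueA x) : Int))) ::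
        pvSpecPairs (seenH ++ [pvHueA x]) xs
def pvF (ids : List Int) (h : Int) : List (Int × Int) :=
  (PySem.List.enumerate ids).filter (fun p => pvHueA p.2 == h)
def pvGroups (ids : List Int) : PySem.Dict Int (List Int) :=
  (PySem.List.enumerate ids).foldl pvGroupStepB PySem.Dict.empty
def pvUpdates (ids : List Int) : List (Int × List (String × String)) :=
  (pvGroups ids).items.flatMap (fun q =>
    (PySem.List.enumerate q.2).map (fun r =>
      (r.2, pvColorEntryB q.1 (PySem.List.pyGetD pvCycleB (PySem.Int.mod r.1 4) 0))))
theorem pvPick_eq (v : Int) :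
    PySem.List.pyGetD pvCycleB (PySem.Int.mod v 4) 0 = pvPickLightnessA v := rfl

theorem pvMem_items_of_get? {κ ν : Type} [BEq κ] [LawfulBEq κ] (d : PySem.Dict κ ν) {k : κ} {v : ν}
    (h : d.get? k = some v) : (k, v) ∈ d.items := by
  unfold PySem.Dict.get? at h
  obtain ⟨p, hp, hv⟩ := Option.map_eq_some_iff.mp h
  have hmem := List.mem_of_find?_eq_some hp
  have hpred := List.find?_some hp
  simp at hpred
  obtain ⟨a, b⟩ := p
  simp_all

theorem pvG_getD_gen (xs : List Int) (s : Int) (g : PySem.Dict Int (List Int)) (h : Int) :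
    ((PySem.List.enumerate xs s).foldl pvGroupStepB g).getD h [] =
      g.getD h [] ++ ((PySem.List.enumerate xs s).filter (fun p => pvHueA p.2 == h)).map Prod.fst := by
  induction xs generalizing s g with
  | nil => simp [PySem.List.enumerate]
  | cons x xs ih =>
      rw [PySem.List.enumerate_cons]
      simp only [List.foldl_cons, List.filter_cons]
      have hstep : pvGroupStepB g (s, x) = g.insert (pvHueA x) (g.getD (pvHueA x) [] ++ [s]) := rfl
      rw [hstep, ih, PySem.Dict.getD_insert]
      by_cases hh : pvHueA x = h
      · subst hh
        simp [List.append_assoc]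
      · simp [hh, Ne.symm hh]

theorem pvG_getD (ids : List Int) (h : Int) :
    (pvGroups ids).getD h [] = (pvF ids h).map Prod.fst := by
  rw [pvGroups, pvG_getD_gen, PySem.Dict.getD_empty]; rfl

theorem pvG_keys_nodup (ids : List Int) : (pvGroups ids).keys.Nodup := by
  rw [pvGroups]
  generalize hg : PySem.Dict.empty = g
  have : g.keys.Nodup := by rw [← hg]; exact PySem.Dict.nodup_keys_empty
  clear hg
  induction PySem.List.enumerate ids generalizing g with
  | nil => simpa
  | cons p l ih => exact ih _ (PySem.Dict.nodup_keys_insert _ _ _ this)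

theorem pvF_pos (xs : List Int) (s h : Int) (i : Nat) (hi : i < xs.length)
    (hh : pvHueA xs[i] = h) :
    ((PySem.List.enumerate xs s).filter (fun p => pvHueA p.2 == h))[((xs.take i).map pvHueA).count h]? =
      some (s + i, xs[i]) := by
  induction xs generalizing s i with
  | nil => simp at hi
  | cons x xs ih =>
      rw [PySem.List.enumerate_cons, List.filter_cons]
      cases i with
      | zero =>
          simp at hh
          simp [hh]
      | succ j =>
          have hj : j < xs.length := by simpa using hi
          have hh' : pvHueA xs[j] = h := by simpa using hh
          have ihj := ih (s+1) j hj hh'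
          have harith : s + ((j+1 : Nat) : Int) = s + 1 + (j : Int) := by push_cast; ring
          by_cases hx : pvHueA x = h
          · rw [if_pos (by simp [hx])]
            have hcnt : (((x :: xs).take (j+1)).map pvHueA).count h
                = ((xs.take j).map pvHueA).count h + 1 := by
              simp [List.take_succ_cons, hx]
            rw [hcnt]
            simp only [List.getElem?_cons_succ, List.getElem_cons_succ, harith]
            exact ihj
          · rw [if_neg (by simp [hx])]
            have hcnt : (((x :: xs).take (j+1)).map pvHueA).count h
                = ((xs.take j).map pvHueA).count h := by
              simp [List.take_succ_cons, hx]
            rw [hcnt]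
            simp only [List.getElem_cons_succ, harith]
            exact ihj

theorem pvF_nodup (ids : List Int) (h : Int) : (pvF ids h).Nodup := by
  have hp := PySem.List.pairwise_lt_enumerate ids 0
  have : (PySem.List.enumerate ids 0).Nodup :=
    List.Pairwise.imp (fun {a b} hlt => by intro he; subst he; exact lt_irrefl _ hlt) hp
  exact this.filter _

theorem pvG_items_val (ids : List Int) (h : Int) (idxs : List Int)
    (hmem : (h, idxs) ∈ (pvGroups ids).items) : idxs = (pvF ids h).map Prod.fst := by
  have := PySem.Dict.get?_of_mem_items _ hmem (pvG_keys_nodup ids)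
  have hg := pvG_getD ids h
  rw [PySem.Dict.getD_eq_get?_getD, this] at hg
  simpa using hg

theorem pvUpdates_value (ids : List Int) (u : Int × List (String × String))
    (hu : u ∈ pvUpdates ids) :
    ∃ k : Nat, k < ids.length ∧ u.1 = (k : Int) ∧
      u.2 = pvEntryOf (pvHueA ids[k]!) ((((ids.take k).map pvHueA).count (pvHueA ids[k]!) : Int)) := by
  rw [pvUpdates] at hu
  obtain ⟨q, hq, hu⟩ := List.mem_flatMap.mp hu
  obtain ⟨r, hr, rfl⟩ := List.mem_map.mp hu
  obtain ⟨h, idxs⟩ := q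
  have hidxs : idxs = (pvF ids h).map Prod.fst := pvG_items_val ids h idxs hq
  obtain ⟨m, hm, rfl⟩ := (PySem.List.mem_enumerate_iff _ _ _).mp hr
  simp only at hm
  rw [hidxs] at hm
  have hm' : m < (pvF ids h).length := by simpa using hm
  have hgetm : idxs[m]'(by rwa [hidxs]) = ((pvF ids h)[m]'hm').1 := by
    simp [hidxs]
  have hFm : (pvF ids h)[m]'hm' ∈ PySem.List.enumerate ids 0 :=
    List.mem_of_mem_filter (List.getElem_mem hm')
  obtain ⟨k, hk, hFk⟩ := (PySem.List.mem_enumerate_iff _ _ _).mp hFm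
  have hmemF : (pvF ids h)[m]'hm' ∈ (PySem.List.enumerate ids).filter (fun p => pvHueA p.2 == h) :=
    List.getElem_mem hm'
  have hpred : (pvHueA ((pvF ids h)[m]'hm').2 == h) = true := (List.mem_filter.mp hmemF).2
  have hhk : pvHueA ids[k] = h := by
    rw [hFk] at hpred; simpa using hpred
  have hpos := pvF_pos ids 0 h k hk hhk
  have hsome : (pvF ids h)[m]? = some ((0 : Int) + k, ids[k]) := by
    rw [List.getElem?_eq_getElem hm', hFk]
  have hmc : m = ((ids.take k).map pvHueA).count h :=
    List.getElem?_inj hm' (pvF_nodup ids h) (by rw [hsome]; exact hpos.symm)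
  have hbang : ids[k]! = ids[k] := getElem!_pos ids k hk
  have h0 : ((0:Int) + (m:Int)) = (m : Int) := by ring
  have hval : pvColorEntryB h (PySem.List.pyGetD pvCycleB (PySem.Int.mod ((0:Int) + m) 4) 0)
      = pvEntryOf (pvHueA ids[k]!) ((((ids.take k).map pvHueA).count (pvHueA ids[k]!) : Int)) := by
    rw [h0, pvPick_eq, hbang, hhk, ← hmc]
    rfl
  refine ⟨k, hk, ?_, ?_⟩
  · simp only [hgetm, hFk]; ring
  · exact hval

theorem pvUpdates_mem (ids : List Int) (i : Nat) (hi : i < ids.length) :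
    ((i : Int), pvEntryOf (pvHueA ids[i]) ((((ids.take i).map pvHueA).count (pvHueA ids[i]) : Int))) ∈
      pvUpdates ids := by
  have hpos := pvF_pos ids 0 (pvHueA ids[i]) i hi rfl
  have hpos' : (pvF ids (pvHueA ids[i]))[((ids.take i).map pvHueA).count (pvHueA ids[i])]? =
      some ((0:Int) + i, ids[i]) := hpos
  have hFne : (pvF ids (pvHueA ids[i])) ≠ [] := by
    intro hnil
    rw [hnil] at hpos'; simp at hpos'
  have hgetD := pvG_getD ids (pvHueA ids[i])
  have hcont : (pvGroups ids).contains (pvHueA ids[i]) = true := by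
    cases hcb : (pvGroups ids).contains (pvHueA ids[i]) with
    | true => rfl
    | false =>
        rw [PySem.Dict.getD_of_not_contains _ _ hcb] at hgetD
        exact absurd (List.map_eq_nil_iff.mp hgetD.symm) hFne
  obtain ⟨idxs, hidxs⟩ : ∃ idxs, (pvGroups ids).get? (pvHueA ids[i]) = some idxs := by
    cases hg : (pvGroups ids).get? (pvHueA ids[i]) with
    | none => rw [(PySem.Dict.get?_eq_none_iff_contains _ _).mp hg] at hcont; simp at hcont
    | some v => exact ⟨v, rfl⟩
  have hitems : (pvHueA ids[i], idxs) ∈ (pvGroups ids).items := pvMem_items_of_get? _ hidxs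
  have hidxsval : idxs = (pvF ids (pvHueA ids[i])).map Prod.fst := pvG_items_val ids _ idxs hitems
  set c := ((ids.take i).map pvHueA).count (pvHueA ids[i]) with hc
  have hidxc : idxs[c]? = some ((0:Int) + i) := by
    rw [hidxsval, List.getElem?_map, hpos']; rfl
  have hcenum : ((c : Int), ((0:Int) + i)) ∈ PySem.List.enumerate idxs := by
    have h1 := PySem.List.getElem?_enumerate idxs 0 c
    rw [hidxc] at h1
    have hmem := List.mem_of_getElem? h1
    simpa using hmem
  rw [pvUpdates]
  refine List.mem_flatMap.mpr ⟨(pvHueA ids[i], idxs), hitems,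
    List.mem_map.mpr ⟨((c : Int), ((0:Int) + i)), hcenum, ?_⟩⟩
  simp only
  have h0 : ((0:Int) + (i:Nat)) = ((i:Nat) : Int) := by ring
  rw [h0, pvPick_eq]
  rfl

theorem pvSetFold_length (us : List (Int × List (String × String)))
    (es : List (List (String × String))) :
    (us.foldl (fun l u => PySem.List.pySetD l u.1 u.2) es).length = es.length := by
  induction us generalizing es with
  | nil => rfl
  | cons u us ih => rw [List.foldl_cons, ih, PySem.List.length_pySetD]

theorem pvSetFold_get (us : List (Int × List (String × String)))
    (es : List (List (String × String))) (i : Nat) (e : List (String × String))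
    (hlen : i < es.length)
    (hmem : ((i : Int), e) ∈ us)
    (hval : ∀ u ∈ us, u.1 = (i : Int) → u.2 = e)
    (hshape : ∀ u ∈ us, ∃ j : Nat, u.1 = (j : Int)) :
    (us.foldl (fun l u => PySem.List.pySetD l u.1 u.2) es)[i]? = some e := by
  induction us using List.reverseRecOn with
  | nil => simp at hmem
  | append_singleton us u ih =>
      rw [List.foldl_append, List.foldl_cons, List.foldl_nil]
      obtain ⟨j, hj⟩ := hshape u (by simp)
      by_cases hji : j = i
      · subst hji
        have hv : u.2 = e := hval u (by simp) hj
        rw [hj, hv, PySem.List.pySetD_natCast]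
        exact List.getElem?_set_self (by rw [pvSetFold_length]; exact hlen)
      · have hne : (i : Int) ≠ u.1 := by rw [hj]; exact_mod_cast (Ne.symm hji)
        have hmem' : ((i : Int), e) ∈ us := by
          rcases List.mem_append.mp hmem with h | h
          · exact h
          · simp only [List.mem_singleton] at h
            rw [← h] at hne; simp at hne
        rw [hj, PySem.List.pySetD_natCast, List.getElem?_set_ne hji]
        exact ih hmem' (fun v hv => hval v (by simp [hv])) (fun v hv => hshape v (by simp [hv]))

theorem pvSpecPairs_length (xs : List Int) : ∀ seenH, (pvSpecPairs seenH xs).length = xs.length := by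
  induction xs with
  | nil => intro _; rfl
  | cons x xs ih => intro seenH; simp [pvSpecPairs, ih]

theorem pvSpecPairs_get (xs : List Int) : ∀ (seenH : List Int) (i : Nat) (hi : i < xs.length),
    (pvSpecPairs seenH xs)[i]? =
      some (xs[i], pvEntryOf (pvHueA xs[i])
        (((seenH ++ (xs.take i).map pvHueA).count (pvHueA xs[i]) : Int))) := by
  induction xs with
  | nil => intro _ i hi; simp at hi
  | cons x xs ih =>
      intro seenH i hi
      cases i with
      | zero => simp [pvSpecPairs]
      | succ j =>
          have hj : j < xs.length := by simpa using hi
          simp only [pvSpecPairs, List.getElem?_cons_succ, List.getElem_cons_succ]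
          rw [ih (seenH ++ [pvHueA x]) j hj]
          simp [List.take_succ_cons, List.append_assoc]

theorem pvA_fold (xs : List Int) : ∀ (seenH : List Int) (c : PySem.Dict Int Int)
    (m : PySem.Dict Int (List (String × String))),
    (∀ h, c.getD h 0 = (seenH.count h : Int)) →
    (xs.foldl pvStepA (c, m)).2 = (pvSpecPairs seenH xs).foldl pvInsB m := by
  induction xs with
  | nil => intro _ _ _ _; simp [pvSpecPairs]
  | cons x xs ih =>
      intro seenH c m hc
      simp only [List.foldl_cons, pvSpecPairs]
      have hv : c.getD (pvHueA x) 0 = (seenH.count (pvHueA x) : Int) := hc _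
      have := ih (seenH ++ [pvHueA x]) (c.insert (pvHueA x) (c.getD (pvHueA x) 0 + 1))
        (m.insert x (pvColorEntryA (pvHueA x) (pvPickLightnessA (c.getD (pvHueA x) 0))))
        (by
          intro h
          rw [PySem.Dict.getD_insert]
          by_cases hh : h = pvHueA x
          · subst hh; simp [hc, List.count_append]
          · simp [hh, hc, List.count_append, List.count_singleton]
            intro heq; exact absurd heq.symm hh)
      simp only [pvStepA, pvInsB] at this ⊢
      rw [this, hv]
      rfl

theorem pvPaint_eq (ids : List Int) (es0 : List (List (String × String))) :
    (pvGroups ids).items.foldl pvPaintB es0 =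
      (pvUpdates ids).foldl (fun l u => PySem.List.pySetD l u.1 u.2) es0 := by
  rw [pvUpdates, List.foldl_flatMap]
  apply PySem.List.foldl_congr_mem
  intro acc q _
  rw [List.foldl_map]
  rfl

theorem pvEntries_get (ids : List Int) (i : Nat) (hi : i < ids.length) :
    ((pvGroups ids).items.foldl pvPaintB (List.replicate ids.length []))[i]? =
      some (pvEntryOf (pvHueA ids[i]) ((((ids.take i).map pvHueA).count (pvHueA ids[i]) : Int))) := by
  rw [pvPaint_eq]
  apply pvSetFold_get
  · simpa using hi
  · exact pvUpdates_mem ids i hi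
  · intro u hu h1
    obtain ⟨k, hk, hk1, hk2⟩ := pvUpdates_value ids u hu
    have hki : k = i := by rw [hk1] at h1; exact_mod_cast h1
    subst hki
    rw [hk2, getElem!_pos ids k hk]
  · intro u hu
    obtain ⟨k, _, hk1, _⟩ := pvUpdates_value ids u hu
    exact ⟨k, hk1⟩

theorem pvZip_eq (ids : List Int) :
    ids.zip ((pvGroups ids).items.foldl pvPaintB (List.replicate ids.length [])) =
      pvSpecPairs [] ids := by
  have hlen : ((pvGroups ids).items.foldl pvPaintB (List.replicate ids.length [])).length = ids.length := by
    rw [pvPaint_eq, pvSetFold_length, List.length_replicate]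
  apply List.ext_getElem
  · rw [List.length_zip, hlen, pvSpecPairs_length]; simp
  · intro i h1 h2
    have hi : i < ids.length := by
      rw [List.length_zip, hlen] at h1; simpa using h1
    have hE := pvEntries_get ids i hi
    have hS := pvSpecPairs_get ids [] i hi
    rw [List.nil_append] at hS
    have hEe : ((pvGroups ids).items.foldl pvPaintB (List.replicate ids.length []))[i]'(by rw [hlen]; exact hi) =
        pvEntryOf (pvHueA ids[i]) ((((ids.take i).map pvHueA).count (pvHueA ids[i]) : Int)) := by
      have := List.getElem?_eq_getElem (l := (pvGroups ids).items.foldl pvPaintB (List.replicate ids.length []))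
        (i := i) (by rw [hlen]; exact hi)
      rw [this] at hE
      exact Option.some.inj hE
    have hSe : (pvSpecPairs [] ids)[i]'h2 =
        (ids[i], pvEntryOf (pvHueA ids[i]) ((((ids.take i).map pvHueA).count (pvHueA ids[i]) : Int))) := by
      have := List.getElem?_eq_getElem (l := pvSpecPairs [] ids) (i := i) h2
      rw [this] at hS
      exact Option.some.inj hS
    rw [List.getElem_zip, hSe, hEe]

theorem pvAgree (ids : List Int) : build_namespace_colors_py ids = build_namespace_colors_py_alt ids := by
  have hA : build_namespace_colors_py ids = ((pvSpecPairs [] ids).foldl pvInsB PySem.Dict.empty).items := by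
    rw [build_namespace_colors_py, pvA_fold ids [] _ _ (fun h => by simp [PySem.Dict.getD_empty])]
  have hB : build_namespace_colors_py_alt ids =
      ((ids.zip ((pvGroups ids).items.foldl pvPaintB (List.replicate ids.length []))).foldl
        pvInsB PySem.Dict.empty).items := rfl
  rw [hA, hB, pvZip_eq]

-- ===== VERDICT (by name: the statement is the Claim_ definition above) =====
theorem build_namespace_colors_py_spec : Claim_equal_build_namespace_colors_py := by
  intro namespace_ids _hdom
  show build_namespace_colors_py namespace_ids = build_namespace_colors_py_alt namespace_ids
  exact pvAgree namespace_ids
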